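-- pv_equiv track=rewrite | github.com/traulab/BeadsOnASpring | Analysis_scripts/fragment_size_counter/fragment_size_counter.py | harmonize_bed_to_bam
-- ===== SOURCE A (Python) =====
-- from collections import defaultdict
--
-- def normalize_contig(contig: str, target_style: str) -> str:
--     """Convert a contig name to match BAM style ('chr' vs 'nochr')."""
--     if target_style == "chr":
--         return contig if contig.startswith("chr") else f"chr{contig}"
--     return contig[3:] if contig.startswith("chr") else contig
--
-- def harmonize_bed_to_bam(chromatin_states: dict, bam_style: str) -> dict:
--     """Normalize BED contig keys to match BAM contig naming style."""
--     out = defaultdict(list)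
--     for chrom, intervals in chromatin_states.items():
--         norm = normalize_contig(chrom, bam_style)
--         out[norm].extend(intervals)
--     for chrom in out:
--         out[chrom].sort(key=lambda x: (x[0], x[1]))
--     return out
-- ===== SOURCE B (Python) =====
-- from collections import defaultdict
--
-- def normalize_contig(contig: str, target_style: str) -> str:
--     """Convert a contig name to match BAM style ('chr' vs 'nochr')."""
--     if target_style == "chr":
--         return contig if contig.startswith("chr") else f"chr{contig}"
--     return contig[3:] if contig.startswith("chr") else contig
--
-- def harmonize_bed_to_bam(chromatin_states: dict, bam_style: str) -> dict:
--     """Normalize BED contig keys to match BAM contig naming style.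
--
--     One global stable sort of the flattened (contig, interval) pairs,
--     then a single partition pass, instead of sorting every group.
--     """
--     out = defaultdict(list)
--     flat = []
--     for chrom, intervals in chromatin_states.items():
--         norm = normalize_contig(chrom, bam_style)
--         out[norm]  # register the key in first-appearance order
--         flat.extend((norm, iv) for iv in intervals)
--     flat.sort(key=lambda p: (p[1][0], p[1][1]))
--     for norm, iv in flat:
--         out[norm].append(iv)
--     return out
-- ===== Notes on version B (the rewrite author's own statement) =====
-- stated objective: alternative
-- what changed: Instead of extending per-key lists and then sorting every group in place, B flattens the dict into one list of (normalized-key, interval) pairs, stable-sorts that list once on (start, end), and partitions it back into the defaultdict in a single pass (stability reproduces A's intra-group tie order).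
import Mathlib
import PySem

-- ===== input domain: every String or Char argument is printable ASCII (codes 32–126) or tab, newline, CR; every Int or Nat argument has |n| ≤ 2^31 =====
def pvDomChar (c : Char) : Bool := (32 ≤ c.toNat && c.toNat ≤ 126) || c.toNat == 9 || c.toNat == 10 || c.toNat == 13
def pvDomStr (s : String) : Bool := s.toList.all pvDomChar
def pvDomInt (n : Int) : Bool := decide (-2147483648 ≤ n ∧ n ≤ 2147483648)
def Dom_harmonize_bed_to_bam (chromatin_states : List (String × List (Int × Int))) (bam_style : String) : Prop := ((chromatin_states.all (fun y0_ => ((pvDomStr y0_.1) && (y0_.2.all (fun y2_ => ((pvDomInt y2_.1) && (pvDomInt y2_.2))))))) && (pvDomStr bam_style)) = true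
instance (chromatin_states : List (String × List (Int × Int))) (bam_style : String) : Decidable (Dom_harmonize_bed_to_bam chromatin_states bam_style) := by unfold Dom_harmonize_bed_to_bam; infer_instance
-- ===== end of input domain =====

-- B replaces A's per-key in-place sorts by ONE global stable sort of the flattened
-- (contig, interval) pairs followed by a single partition pass (objective: alternative).

-- ===== PORT A =====
-- shared helper, identical source in both Pythons
def normalize_contig (contig : String) (target_style : String) : String :=
  if target_style == "chr" then
    if PySem.Str.startswith contig "chr" then contig else "chr" ++ contig
  else
    if PySem.Str.startswith contig "chr" then PySem.Str.slice contig (some 3) none else contig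

def harmonize_bed_to_bam (chromatin_states : List (String × List (Int × Int))) (bam_style : String) : List (String × List (Int × Int)) :=
  -- out = defaultdict(list); for chrom, intervals: out[norm].extend(intervals)
  let out := chromatin_states.foldl
    (fun (d : PySem.Dict String (List (Int × Int))) ci =>
      d.modify (normalize_contig ci.1 bam_style) [] (fun v => v ++ ci.2))
    PySem.Dict.empty
  -- for chrom in out: out[chrom].sort(key=lambda x: (x[0], x[1]))
  let out2 := out.keys.foldl
    (fun d chrom => d.modify chrom [] (fun v => PySem.List.sorted2 v (fun x => x.1) (fun x => x.2)))
    out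
  out2.items

-- ===== PORT B =====
def harmonize_bed_to_bam_alt (chromatin_states : List (String × List (Int × Int))) (bam_style : String) : List (String × List (Int × Int)) :=
  -- one loop: register each normalized key (defaultdict read) and flatten the intervals
  let st := chromatin_states.foldl
    (fun (s : PySem.Dict String (List (Int × Int)) × List (String × (Int × Int))) ci =>
      let norm := normalize_contig ci.1 bam_style
      (s.1.modify norm [] (fun v => v), s.2 ++ ci.2.map (fun iv => (norm, iv))))
    (PySem.Dict.empty, [])
  -- flat.sort(key=lambda p: (p[1][0], p[1][1]))  (stable)
  let flatS := PySem.List.sorted2 st.2 (fun p => p.2.1) (fun p => p.2.2)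
  -- partition pass: out[norm].append(iv)
  let out := flatS.foldl (fun d p => d.modify p.1 [] (fun v => v ++ [p.2])) st.1
  out.items

-- ===== PRECONDITION & SPEC =====
def Spec_harmonize_bed_to_bam (chromatin_states : List (String × List (Int × Int))) (bam_style : String) (out : List (String × List (Int × Int))) : Prop := out = harmonize_bed_to_bam_alt chromatin_states bam_style
instance (chromatin_states : List (String × List (Int × Int))) (bam_style : String) (out : List (String × List (Int × Int))) : Decidable (Spec_harmonize_bed_to_bam chromatin_states bam_style out) := by unfold Spec_harmonize_bed_to_bam; infer_instance

-- ===== CLAIM (what is proved, stated in full; the proofs are below) =====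
def Claim_equal_harmonize_bed_to_bam : Prop := ∀ (chromatin_states : List (String × List (Int × Int))) (bam_style : String), Dom_harmonize_bed_to_bam chromatin_states bam_style → Spec_harmonize_bed_to_bam chromatin_states bam_style (harmonize_bed_to_bam chromatin_states bam_style)

-- ===== LEMMAS AND PROOFS =====

-- the normalized key of one input item
def nkey (bam_style : String) (ci : String × List (Int × Int)) : String := normalize_contig ci.1 bam_style

-- all intervals of items whose normalized key is k, in input order
def gather (bam_style : String) (k : String) (cs : List (String × List (Int × Int))) : List (Int × Int) :=
  (cs.filter (fun ci => nkey bam_style ci == k)).flatMap (fun ci => ci.2)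

-- the comparator sorted2 uses on flattened pairs / on bare intervals
def bF (a b : String × (Int × Int)) : Bool :=
  decide (a.2.1 < b.2.1) || (!decide (b.2.1 < a.2.1) && decide (a.2.2 < b.2.2))
def bG (a b : Int × Int) : Bool :=
  decide (a.1 < b.1) || (!decide (b.1 < a.1) && decide (a.2 < b.2))

lemma sorted2F_eq (xs : List (String × (Int × Int))) :
    PySem.List.sorted2 xs (fun p => p.2.1) (fun p => p.2.2) =
      xs.foldl (fun acc x => PySem.List.insertBy bF x acc) [] := rfl

lemma sorted2G_eq (xs : List (Int × Int)) :
    PySem.List.sorted2 xs (fun x => x.1) (fun x => x.2) =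
      xs.foldl (fun acc x => PySem.List.insertBy bG x acc) [] := rfl

lemma insertBy_nil {α : Type} (b : α → α → Bool) (x : α) : PySem.List.insertBy b x [] = [x] := rfl
lemma insertBy_cons {α : Type} (b : α → α → Bool) (x y : α) (ys : List α) :
    PySem.List.insertBy b x (y :: ys) =
      if b x y then x :: y :: ys else y :: PySem.List.insertBy b x ys := rfl

lemma bF_asymm {a b : String × (Int × Int)} (h : bF a b = true) : bF b a = false := by
  simp only [bF, Bool.or_eq_true, Bool.or_eq_false_iff, Bool.and_eq_true, Bool.and_eq_false_iff,
    Bool.not_eq_true', Bool.not_eq_false', decide_eq_true_eq, decide_eq_false_iff_not] at *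
  omega

lemma bF_lt_of_lt_of_le {x y z : String × (Int × Int)} (h1 : bF x y = true) (h2 : bF z y = false) :
    bF x z = true := by
  simp only [bF, Bool.or_eq_true, Bool.or_eq_false_iff, Bool.and_eq_true, Bool.and_eq_false_iff,
    Bool.not_eq_true', Bool.not_eq_false', decide_eq_true_eq, decide_eq_false_iff_not] at *
  omega

lemma bF_eq_bG (a b : String × (Int × Int)) : bF a b = bG a.2 b.2 := rfl

-- "nondecreasing w.r.t. the sort key": what insertion-sort accumulators satisfy
def Nondecr (ys : List (String × (Int × Int))) : Prop := ys.Pairwise (fun a b => bF b a = false)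

lemma nondecr_insertBy {x : String × (Int × Int)} {ys : List (String × (Int × Int))}
    (h : Nondecr ys) : Nondecr (PySem.List.insertBy bF x ys) := by
  induction ys with
  | nil => simp [Nondecr, insertBy_nil]
  | cons y ys ih =>
    rcases (List.pairwise_cons.mp h) with ⟨hy, htl⟩
    by_cases hb : bF x y = true
    · rw [insertBy_cons, if_pos hb]
      refine List.pairwise_cons.mpr ⟨?_, h⟩
      intro z hz
      rcases List.mem_cons.mp hz with hz | hz
      · subst hz; exact bF_asymm hb
      · exact bF_asymm (bF_lt_of_lt_of_le hb (hy z hz))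
    · rw [insertBy_cons, if_neg hb]
      refine List.pairwise_cons.mpr ⟨?_, ih htl⟩
      intro z hz
      rcases (PySem.List.mem_insertBy _ _ _ _).mp hz with hz | hz
      · subst hz; exact Bool.eq_false_iff.mpr hb
      · exact hy z hz

lemma insertBy_eq_cons {x : String × (Int × Int)} {zs : List (String × (Int × Int))}
    (h : ∀ z ∈ zs, bF x z = true) : PySem.List.insertBy bF x zs = x :: zs := by
  cases zs with
  | nil => rfl
  | cons z zs => rw [insertBy_cons, if_pos (h z (List.mem_cons_self))]

lemma filter_insertBy (p : String × (Int × Int) → Bool) {x : String × (Int × Int)}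
    {ys : List (String × (Int × Int))} (h : Nondecr ys) :
    (PySem.List.insertBy bF x ys).filter p =
      if p x then PySem.List.insertBy bF x (ys.filter p) else ys.filter p := by
  induction ys with
  | nil => cases hp : p x <;> simp [insertBy_nil, List.filter, hp]
  | cons y ys ih =>
    rcases (List.pairwise_cons.mp h) with ⟨hy, htl⟩
    by_cases hb : bF x y = true
    · rw [insertBy_cons, if_pos hb]
      cases hp : p x with
      | false => simp [List.filter_cons, hp]
      | true =>
        cases hpy : p y with
        | true => simp [hp, hpy, insertBy_cons, hb]
        | false =>
          simp only [List.filter_cons, hp, hpy, if_pos]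
          rw [insertBy_eq_cons]
          intro z hz
          have hzys : z ∈ ys := List.mem_of_mem_filter hz
          exact bF_lt_of_lt_of_le hb (hy z hzys)
    · rw [insertBy_cons, if_neg hb]
      have hb' : bF x y = false := Bool.eq_false_iff.mpr hb
      cases hp : p x with
      | false =>
        cases hpy : p y <;>
          simp [hp, hpy, ih htl]
      | true =>
        cases hpy : p y with
        | true => simp [hp, hpy, ih htl, insertBy_cons, hb']
        | false => simp [hp, hpy, ih htl]

lemma filter_foldl_insertBy (p : String × (Int × Int) → Bool) :
    ∀ (l : List (String × (Int × Int))) (acc : List (String × (Int × Int))), Nondecr acc →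
      (l.foldl (fun acc x => PySem.List.insertBy bF x acc) acc).filter p =
        (l.filter p).foldl (fun acc x => PySem.List.insertBy bF x acc) (acc.filter p) := by
  intro l
  induction l with
  | nil => intro acc _; rfl
  | cons x l ih =>
    intro acc hacc
    rw [List.foldl_cons, ih _ (nondecr_insertBy hacc), filter_insertBy p hacc]
    cases hp : p x with
    | true => simp [hp]
    | false => simp [hp]

lemma mapSnd_insertBy (x : String × (Int × Int)) (ys : List (String × (Int × Int))) :
    (PySem.List.insertBy bF x ys).map Prod.snd =
      PySem.List.insertBy bG x.2 (ys.map Prod.snd) := by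
  induction ys with
  | nil => rfl
  | cons y ys ih =>
    rw [insertBy_cons, bF_eq_bG]
    cases hb : bG x.2 y.2 <;> simp [hb, insertBy_cons, ih]

lemma mapSnd_foldl_insertBy :
    ∀ (l : List (String × (Int × Int))) (acc : List (String × (Int × Int))),
      (l.foldl (fun acc x => PySem.List.insertBy bF x acc) acc).map Prod.snd =
        (l.map Prod.snd).foldl (fun acc x => PySem.List.insertBy bG x acc) (acc.map Prod.snd) := by
  intro l
  induction l with
  | nil => intro acc; rfl
  | cons x l ih =>
    intro acc
    rw [List.foldl_cons, List.map_cons, List.foldl_cons, ih, mapSnd_insertBy]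

-- the flattened pair list B builds
def flatOf (bam_style : String) (cs : List (String × List (Int × Int))) : List (String × (Int × Int)) :=
  cs.flatMap (fun ci => ci.2.map (fun iv => (nkey bam_style ci, iv)))

lemma filter_flatOf_map_snd (bam_style : String) (k : String) (cs : List (String × List (Int × Int))) :
    ((flatOf bam_style cs).filter (fun p => p.1 == k)).map Prod.snd = gather bam_style k cs := by
  induction cs with
  | nil => rfl
  | cons c cs ih =>
    simp only [flatOf, gather, List.flatMap_cons, List.filter_append, List.map_append] at *
    rw [List.filter_map]
    cases hk : nkey bam_style c == k with
    | true =>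
      have : ∀ b ∈ c.2, ((fun p => p.1 == k) ∘ fun iv => (nkey bam_style c, iv)) b = true := by
        intro b _; simpa using hk
      rw [List.filter_eq_self.mpr this]
      simp [hk, ih]
    | false =>
      have : c.2.filter ((fun p => p.1 == k) ∘ fun iv => (nkey bam_style c, iv)) = [] := by
        apply List.filter_eq_nil_iff.mpr
        intro b _; simpa using hk
      rw [this]
      simp [hk, ih]

-- ---- dict-building lemmas ----

lemma getD_foldl_extend (bam_style : String) :
    ∀ (l : List (String × List (Int × Int))) (d : PySem.Dict String (List (Int × Int))) (k : String),
      (l.foldl (fun d ci => d.modify (normalize_contig ci.1 bam_style) [] (fun v => v ++ ci.2)) d).getD k [] =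
        d.getD k [] ++ gather bam_style k l := by
  intro l
  induction l with
  | nil => intro d k; simp [gather]
  | cons c l ih =>
    intro d k
    rw [List.foldl_cons, ih, PySem.Dict.getD_modify]
    by_cases hk : k = normalize_contig c.1 bam_style
    · simp [gather, nkey, hk, List.flatMap_cons]
    · have : (nkey bam_style c == k) = false := by
        simp [nkey]; exact fun h => hk h.symm
      simp [gather, this, hk]

lemma getD_foldl_register (bam_style : String) :
    ∀ (l : List (String × List (Int × Int))) (d : PySem.Dict String (List (Int × Int))) (k : String),
      (l.foldl (fun d ci => d.modify (normalize_contig ci.1 bam_style) [] (fun v => v)) d).getD k [] =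
        d.getD k [] := by
  intro l
  induction l with
  | nil => intro d k; rfl
  | cons c l ih =>
    intro d k
    rw [List.foldl_cons, ih, PySem.Dict.getD_modify]
    split_ifs with h
    · rw [h]
    · rfl

lemma getD_foldl_sort :
    ∀ (ks : List String) (d : PySem.Dict String (List (Int × Int))), ks.Nodup → ∀ (k : String),
      (ks.foldl (fun d chrom => d.modify chrom [] (fun v => PySem.List.sorted2 v (fun x => x.1) (fun x => x.2))) d).getD k [] =
        if k ∈ ks then PySem.List.sorted2 (d.getD k []) (fun x => x.1) (fun x => x.2) else d.getD k [] := by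
  intro ks
  induction ks with
  | nil => intro d _ k; simp
  | cons k' ks ih =>
    intro d hnd k
    rcases List.nodup_cons.mp hnd with ⟨hk', hnd'⟩
    rw [List.foldl_cons, ih _ hnd']
    by_cases hmem : k ∈ ks
    · have hne : k ≠ k' := fun h => hk' (h ▸ hmem)
      rw [if_pos hmem, if_pos (List.mem_cons.mpr (Or.inr hmem)), PySem.Dict.getD_modify, if_neg hne]
    · rw [if_neg hmem, PySem.Dict.getD_modify]
      by_cases he : k = k'
      · rw [if_pos he, if_pos (List.mem_cons.mpr (Or.inl he)), he]
      · rw [if_neg he, if_neg (fun h => (List.mem_cons.mp h).elim he hmem)]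

lemma set_update_of_subset {s : PySem.Set String} {xs : List String}
    (h : ∀ y ∈ xs, y ∈ s) : PySem.Set.update s xs = s := by
  rw [PySem.Set.update_eq_append_filter]
  have : (PySem.Set.ofList xs).filter (fun y => !s.contains y) = [] := by
    apply List.filter_eq_nil_iff.mpr
    intro y hy
    have hmem : y ∈ s := h y ((PySem.Set.mem_ofList xs y).mp hy)
    simp [PySem.Set.contains, hmem]
  rw [this, List.append_nil]

-- split B's product-state fold into its two components
lemma foldl_prod {α δ ε : Type} (l : List α) (F : δ → α → δ) (G : ε → α → ε) :
    ∀ (d : δ) (e : ε),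
      l.foldl (fun s x => (F s.1 x, G s.2 x)) (d, e) = (l.foldl F d, l.foldl G e) := by
  induction l with
  | nil => intro d e; rfl
  | cons x l ih => intro d e; rw [List.foldl_cons, List.foldl_cons, List.foldl_cons]; exact ih _ _

-- the canonical form both ports are reduced to
lemma ports_eq_canon (cs : List (String × List (Int × Int))) (bam_style : String) :
    harmonize_bed_to_bam cs bam_style =
        (PySem.Set.ofList (cs.map (nkey bam_style))).map
          (fun k => (k, PySem.List.sorted2 (gather bam_style k cs) (fun x => x.1) (fun x => x.2)))
      ∧
    harmonize_bed_to_bam_alt cs bam_style =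
        (PySem.Set.ofList (cs.map (nkey bam_style))).map
          (fun k => (k, PySem.List.sorted2 (gather bam_style k cs) (fun x => x.1) (fun x => x.2))) := by
  constructor
  · -- PORT A
    show (_ : List (String × List (Int × Int))) = _
    simp only [harmonize_bed_to_bam]
    set DA := cs.foldl
      (fun (d : PySem.Dict String (List (Int × Int))) ci =>
        d.modify (normalize_contig ci.1 bam_style) [] (fun v => v ++ ci.2))
      PySem.Dict.empty with hDA
    have hkeys : DA.keys = PySem.Set.ofList (cs.map (nkey bam_style)) := by
      rw [hDA]
      have h := PySem.Dict.keys_foldl_modify_key cs (fun ci => normalize_contig ci.1 bam_style) []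
        (fun _ ci v => v ++ ci.2) PySem.Dict.empty
      simpa [nkey, PySem.Dict.keys_empty, PySem.Set.update_nil_left] using h
    have hnodA : DA.keys.Nodup := by
      rw [hDA]
      exact PySem.Dict.nodup_keys_foldl_modify_key cs (fun ci => normalize_contig ci.1 bam_style) []
        (fun _ ci v => v ++ ci.2) _ PySem.Dict.nodup_keys_empty
    have hgetA : ∀ k, DA.getD k [] = gather bam_style k cs := by
      intro k; rw [hDA, getD_foldl_extend]; simp
    set D2 := DA.keys.foldl
      (fun d chrom => d.modify chrom [] (fun v => PySem.List.sorted2 v (fun x => x.1) (fun x => x.2))) DA with hD2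
    have hkeys2 : D2.keys = DA.keys := by
      rw [hD2]
      have h := PySem.Dict.keys_foldl_modify DA.keys []
        (fun _ _ v => PySem.List.sorted2 v (fun x => x.1) (fun x => x.2)) DA
      rw [set_update_of_subset (fun y hy => hy)] at h
      simpa using h
    have hnod2 : D2.keys.Nodup := hkeys2 ▸ hnodA
    rw [PySem.Dict.items_eq_map_keys D2 hnod2 [], hkeys2, hkeys]
    apply List.map_congr_left
    intro k hk
    have hkmem : k ∈ DA.keys := hkeys ▸ hk
    rw [hD2, getD_foldl_sort DA.keys DA hnodA k, if_pos hkmem, hgetA]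
  · -- PORT B
    show (_ : List (String × List (Int × Int))) = _
    simp only [harmonize_bed_to_bam_alt]
    rw [foldl_prod cs
      (fun (d : PySem.Dict String (List (Int × Int))) ci =>
        d.modify (normalize_contig ci.1 bam_style) [] (fun v => v))
      (fun fl ci => fl ++ ci.2.map (fun iv => (normalize_contig ci.1 bam_style, iv)))]
    have hflat : cs.foldl (fun fl ci => fl ++ ci.2.map (fun iv => (normalize_contig ci.1 bam_style, iv))) [] =
        flatOf bam_style cs := by
      rw [PySem.List.foldl_append_eq_flatMap (fun ci => ci.2.map (fun iv => (normalize_contig ci.1 bam_style, iv))) cs []]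
      rfl
    set d0 := cs.foldl
      (fun (d : PySem.Dict String (List (Int × Int))) ci =>
        d.modify (normalize_contig ci.1 bam_style) [] (fun v => v))
      PySem.Dict.empty with hd0
    have hkeys0 : d0.keys = PySem.Set.ofList (cs.map (nkey bam_style)) := by
      rw [hd0]
      have h := PySem.Dict.keys_foldl_modify_key cs (fun ci => normalize_contig ci.1 bam_style) []
        (fun _ _ (v : List (Int × Int)) => v) PySem.Dict.empty
      simpa [nkey, PySem.Dict.keys_empty, PySem.Set.update_nil_left] using h
    have hnod0 : d0.keys.Nodup := by
      rw [hd0]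
      exact PySem.Dict.nodup_keys_foldl_modify_key cs (fun ci => normalize_contig ci.1 bam_style) []
        (fun _ _ (v : List (Int × Int)) => v) _ PySem.Dict.nodup_keys_empty
    have hget0 : ∀ k, d0.getD k [] = [] := by
      intro k; rw [hd0, getD_foldl_register]; simp
    rw [hflat]
    set flatS := PySem.List.sorted2 (flatOf bam_style cs) (fun p => p.2.1) (fun p => p.2.2) with hflatS
    set out := flatS.foldl (fun d p => d.modify p.1 [] (fun v => v ++ [p.2])) d0 with hout
    have hmemflatS : ∀ y ∈ flatS.map Prod.fst, y ∈ d0.keys := by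
      intro y hy
      rcases List.mem_map.mp hy with ⟨p, hp, hpy⟩
      have hpflat : p ∈ flatOf bam_style cs :=
        ((PySem.List.sorted2_perm (flatOf bam_style cs) (fun p => p.2.1) (fun p => p.2.2) false).mem_iff).mp hp
      rcases List.mem_flatMap.mp hpflat with ⟨ci, hci, hpin⟩
      rcases List.mem_map.mp hpin with ⟨iv, _, hiv⟩
      rw [hkeys0, PySem.Set.mem_ofList]
      exact List.mem_map.mpr ⟨ci, hci, by rw [← hpy, ← hiv]⟩
    have hkeysO : out.keys = d0.keys := by
      rw [hout]
      have h := PySem.Dict.keys_foldl_modify_key flatS (fun p => p.1) [] (fun _ p v => v ++ [p.2]) d0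
      rw [set_update_of_subset hmemflatS] at h
      simpa using h
    have hnodO : out.keys.Nodup := hkeysO ▸ hnod0
    rw [PySem.Dict.items_eq_map_keys out hnodO [], hkeysO, hkeys0]
    apply List.map_congr_left
    intro k _
    have hgetO : out.getD k [] = (flatS.filter (fun p => p.1 == k)).map (fun x => x.2) := by
      rw [hout, PySem.Dict.getD_foldl_modify_append flatS d0 k, hget0]
      simp
    rw [hgetO]
    -- stability: filtering the globally sorted list = sorting the gathered group
    have h1 : flatS.filter (fun p => p.1 == k) =
        ((flatOf bam_style cs).filter (fun p => p.1 == k)).foldl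
          (fun acc x => PySem.List.insertBy bF x acc) [] := by
      rw [hflatS, sorted2F_eq,
        filter_foldl_insertBy (fun p => p.1 == k) (flatOf bam_style cs) [] List.Pairwise.nil]
      rfl
    rw [h1]
    have h2 := mapSnd_foldl_insertBy ((flatOf bam_style cs).filter (fun p => p.1 == k)) []
    simp only [List.map_nil] at h2
    rw [show (fun (x : String × (Int × Int)) => x.2) = Prod.snd from rfl, h2,
      filter_flatOf_map_snd bam_style k cs, ← sorted2G_eq]

-- ===== VERDICT (by name: the statement is the Claim_ definition above) =====
theorem harmonize_bed_to_bam_spec : Claim_equal_harmonize_bed_to_bam := by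
  intro cs bam _
  unfold Spec_harmonize_bed_to_bam
  rcases ports_eq_canon cs bam with ⟨hA, hB⟩
  rw [hA, hB]
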